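-- pv_equiv track=rewrite | github.com/wkazmierczak/Introduction_to_Computer_Science_AGH_UST_course | university_colloquiums/col_2/2020_zad_2.py | operacja_C
-- ===== SOURCE A (Python) =====
-- def operacja_C(num):
--     c_num = num
--     i = 0
--     while c_num > 0:
--         digit = c_num % 10
--         if digit % 2 == 1:
--             num = num - 10**i
--         c_num //= 10
--         i += 1
--     return num
-- ===== SOURCE B (Python) =====
-- def operacja_C(num):
--     # Evenize the decimal digits: rebuild the number recursively from divmod
--     # instead of scanning with a position counter and subtracting powers of ten.
--     if num <= 0:
--         return num
--     q, d = divmod(num, 10)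
--     return 10 * operacja_C(q) + (d - d % 2)
-- ===== Notes on version B (the rewrite author's own statement) =====
-- stated objective: simpler
-- what changed: Replaces the while loop that tracks a digit index and subtracts the matching power of ten from the original number by a three-line divmod recursion that rebuilds the number with each odd digit decremented.
import Mathlib
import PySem

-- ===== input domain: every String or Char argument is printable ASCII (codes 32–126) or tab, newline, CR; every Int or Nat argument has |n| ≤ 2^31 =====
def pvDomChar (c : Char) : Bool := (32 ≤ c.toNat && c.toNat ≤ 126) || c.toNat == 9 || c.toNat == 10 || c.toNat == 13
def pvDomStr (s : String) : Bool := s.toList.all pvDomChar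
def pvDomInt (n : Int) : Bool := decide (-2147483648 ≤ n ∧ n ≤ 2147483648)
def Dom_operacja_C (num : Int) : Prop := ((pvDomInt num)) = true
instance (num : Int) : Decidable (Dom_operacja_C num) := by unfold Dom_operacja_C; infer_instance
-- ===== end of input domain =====

-- B replaces A's index-tracking subtraction loop by a divmod recursion that
-- rebuilds the number with each odd digit decremented (objective: simpler).


-- termination helper for both ports: c // 10 shrinks while c > 0
theorem pvDiv10_lt (c : Int) (h : 0 < c) : (PySem.Int.floordiv c 10).toNat < c.toNat := by
  have hc : c = ((c.toNat : Nat) : Int) := by omega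
  rw [hc, show ((10 : Int) = ((10 : Nat) : Int)) from rfl, PySem.Int.floordiv_natCast]
  simp only [Int.toNat_natCast]
  exact Nat.div_lt_self (by omega) (by omega)

-- ===== PORT A =====
-- the while loop of A: state (c_num, num, i)
def opCLoop (cnum num : Int) (i : Nat) : Int :=
  if h : cnum > 0 then
    let digit := PySem.Int.mod cnum 10
    let num' := if PySem.Int.mod digit 2 = 1 then num - 10 ^ i else num
    opCLoop (PySem.Int.floordiv cnum 10) num' (i + 1)
  else num
termination_by cnum.toNat
decreasing_by exact pvDiv10_lt _ h

def operacja_C (num : Int) : Int := opCLoop num num 0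

-- ===== PORT B =====
def operacja_C_alt (num : Int) : Int :=
  if h : num ≤ 0 then num
  else
    let q := PySem.Int.floordiv num 10
    let d := PySem.Int.mod num 10
    10 * operacja_C_alt q + (d - PySem.Int.mod d 2)
termination_by num.toNat
decreasing_by exact pvDiv10_lt _ (by omega)

-- ===== PRECONDITION & SPEC =====
def Spec_operacja_C (num : Int) (out : Int) : Prop := out = operacja_C_alt num
instance (num : Int) (out : Int) : Decidable (Spec_operacja_C num out) := by unfold Spec_operacja_C; infer_instance

-- ===== CLAIM (what is proved, stated in full; the proofs are below) =====
def Claim_equal_operacja_C : Prop := ∀ (num : Int), Dom_operacja_C num → Spec_operacja_C num (operacja_C num)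

-- ===== LEMMAS AND PROOFS =====

-- Σ 10^j * (digit_j % 2): the amount A subtracts / B removes, per digit
def oddMask (c : Int) : Int :=
  if h : c ≤ 0 then 0
  else PySem.Int.mod (PySem.Int.mod c 10) 2 + 10 * oddMask (PySem.Int.floordiv c 10)
termination_by c.toNat
decreasing_by exact pvDiv10_lt _ (by omega)

theorem opCLoop_eq (n : Nat) : ∀ (c m : Int) (i : Nat), c.toNat ≤ n →
    opCLoop c m i = m - 10 ^ i * oddMask c := by
  induction n with
  | zero =>
    intro c m i hc
    rw [opCLoop, oddMask, dif_neg (show ¬ (c > 0) by omega), dif_pos (show c ≤ 0 by omega)]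
    ring
  | succ n ih =>
    intro c m i hc
    by_cases hpos : c > 0
    · rw [opCLoop, oddMask, dif_pos hpos, dif_neg (by omega)]
      show opCLoop (PySem.Int.floordiv c 10)
          (if PySem.Int.mod (PySem.Int.mod c 10) 2 = 1 then m - 10 ^ i else m) (i + 1) =
          m - 10 ^ i *
            (PySem.Int.mod (PySem.Int.mod c 10) 2 + 10 * oddMask (PySem.Int.floordiv c 10))
      rw [ih _ _ (i + 1) (by have := pvDiv10_lt c hpos; omega)]
      have hm2lo : 0 ≤ PySem.Int.mod (PySem.Int.mod c 10) 2 :=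
        PySem.Int.mod_nonneg _ (by norm_num)
      have hm2hi : PySem.Int.mod (PySem.Int.mod c 10) 2 < 2 :=
        PySem.Int.mod_lt _ (by norm_num)
      by_cases hodd : PySem.Int.mod (PySem.Int.mod c 10) 2 = 1
      · rw [if_pos hodd, hodd]; ring
      · rw [if_neg hodd]
        have h0 : PySem.Int.mod (PySem.Int.mod c 10) 2 = 0 := by omega
        rw [h0]; ring
    · rw [opCLoop, oddMask, dif_neg hpos, dif_pos (by omega)]
      ring

theorem alt_eq (n : Nat) : ∀ (c : Int), c.toNat ≤ n →
    operacja_C_alt c = c - oddMask c := by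
  induction n with
  | zero =>
    intro c hc
    rw [operacja_C_alt, oddMask, dif_pos (show c ≤ 0 by omega), dif_pos (show c ≤ 0 by omega)]
    ring
  | succ n ih =>
    intro c hc
    by_cases hle : c ≤ 0
    · rw [operacja_C_alt, oddMask, dif_pos hle, dif_pos hle]; ring
    · rw [operacja_C_alt, oddMask, dif_neg hle, dif_neg hle]
      have hrec := ih (PySem.Int.floordiv c 10)
        (by have := pvDiv10_lt c (by omega); omega)
      have hsplit : PySem.Int.floordiv c 10 * 10 + PySem.Int.mod c 10 = c :=
        PySem.Int.floordiv_mul_add_mod c 10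
      show 10 * operacja_C_alt (PySem.Int.floordiv c 10) +
          (PySem.Int.mod c 10 - PySem.Int.mod (PySem.Int.mod c 10) 2) =
          c - (PySem.Int.mod (PySem.Int.mod c 10) 2 + 10 * oddMask (PySem.Int.floordiv c 10))
      rw [hrec]
      omega

-- ===== VERDICT (by name: the statement is the Claim_ definition above) =====
theorem operacja_C_spec : Claim_equal_operacja_C := by
  intro num _
  unfold Spec_operacja_C operacja_C
  rw [opCLoop_eq num.toNat num num 0 le_rfl, alt_eq num.toNat num le_rfl]
  ring
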